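-- pv_equiv track=rewrite | github.com/jclements3/HarpHymnal | mapper/harp_mapper.py | cycle_of_transition
-- ===== SOURCE A (Python) =====
-- def cycle_of_transition(deg_from, deg_to):
--     """Return ``(cycle, direction)`` or ``(None, None)`` for non-cycle edges.
--
--     Cycle traversals (CW, returning to 1 after 7 steps):
--       2nds CW: 1 2 3 4 5 6 7
--       3rds CW: 1 3 5 7 2 4 6
--       4ths CW: 1 4 7 3 6 2 5
--     """
--     if deg_from is None or deg_to is None or deg_from == deg_to:
--         return None, None
--     cw_traversals = {
--         '2nds': [1, 2, 3, 4, 5, 6, 7],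
--         '3rds': [1, 3, 5, 7, 2, 4, 6],
--         '4ths': [1, 4, 7, 3, 6, 2, 5],
--     }
--     for cyc, order in cw_traversals.items():
--         try:
--             idx_from = order.index(deg_from)
--             idx_to = order.index(deg_to)
--             if (idx_to - idx_from) % 7 == 1:
--                 return cyc, 'CW'
--             if (idx_from - idx_to) % 7 == 1:
--                 return cyc, 'CCW'
--         except ValueError:
--             continue
--     return None, None
-- ===== SOURCE B (Python) =====
-- _STEP = {
--     1: ('2nds', 'CW'),
--     2: ('3rds', 'CW'),
--     3: ('4ths', 'CW'),
--     4: ('4ths', 'CCW'),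
--     5: ('3rds', 'CCW'),
--     6: ('2nds', 'CCW'),
-- }
--
-- def cycle_of_transition(deg_from, deg_to):
--     """Arithmetic version: each cycle is a fixed step mod 7 around the degrees."""
--     degrees = {1, 2, 3, 4, 5, 6, 7}
--     if deg_from not in degrees or deg_to not in degrees:
--         return None, None
--     return _STEP.get((deg_to - deg_from) % 7, (None, None))
-- ===== Notes on version B (the rewrite author's own statement) =====
-- stated objective: simpler
-- what changed: Replaced the three-traversal-list loop with .index scans by a single membership guard and a constant-time lookup of (deg_to - deg_from) % 7 in a fixed six-entry step table.
import Mathlib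
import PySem

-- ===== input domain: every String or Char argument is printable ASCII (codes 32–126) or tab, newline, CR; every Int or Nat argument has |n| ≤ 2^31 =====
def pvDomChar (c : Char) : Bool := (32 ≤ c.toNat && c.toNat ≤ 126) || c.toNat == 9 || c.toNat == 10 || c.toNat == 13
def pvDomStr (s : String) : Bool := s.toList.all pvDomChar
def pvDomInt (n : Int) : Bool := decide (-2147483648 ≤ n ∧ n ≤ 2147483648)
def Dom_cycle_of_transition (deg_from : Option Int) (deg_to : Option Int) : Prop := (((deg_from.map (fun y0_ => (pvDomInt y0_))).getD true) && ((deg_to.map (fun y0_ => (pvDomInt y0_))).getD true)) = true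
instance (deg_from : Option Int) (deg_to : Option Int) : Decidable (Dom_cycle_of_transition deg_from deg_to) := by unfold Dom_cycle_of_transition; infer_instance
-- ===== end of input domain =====

-- B replaces the three-traversal .index loop by a membership guard and a mod-7 step-table lookup (simpler).
-- ===== PORT A =====
def cycleLoopA (a b : Int) : List (String × List Int) → Option String × Option String
  | [] => (none, none)
  | (cyc, order) :: rest =>
    match PySem.List.index? order a, PySem.List.index? order b with
    | some idxFrom, some idxTo =>
      if PySem.Int.mod ((idxTo : Int) - (idxFrom : Int)) 7 = 1 then (some cyc, some "CW")
      else if PySem.Int.mod ((idxFrom : Int) - (idxTo : Int)) 7 = 1 then (some cyc, some "CCW")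
      else cycleLoopA a b rest
    | _, _ => cycleLoopA a b rest

def cycle_of_transition (deg_from : Option Int) (deg_to : Option Int) : Option String × Option String :=
  match deg_from, deg_to with
  | none, _ => (none, none)
  | _, none => (none, none)
  | some a, some b =>
    if a = b then (none, none)
    else
      cycleLoopA a b
        [("2nds", [1, 2, 3, 4, 5, 6, 7]),
         ("3rds", [1, 3, 5, 7, 2, 4, 6]),
         ("4ths", [1, 4, 7, 3, 6, 2, 5])]

-- ===== PORT B =====
def stepTable : PySem.Dict Int (Option String × Option String) :=
  PySem.Dict.ofList
  [(1, (some "2nds", some "CW")),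
   (2, (some "3rds", some "CW")),
   (3, (some "4ths", some "CW")),
   (4, (some "4ths", some "CCW")),
   (5, (some "3rds", some "CCW")),
   (6, (some "2nds", some "CCW"))]

def cycle_of_transition_alt (deg_from : Option Int) (deg_to : Option Int) : Option String × Option String :=
  match deg_from, deg_to with
  | some a, some b =>
    if a ∈ ([1, 2, 3, 4, 5, 6, 7] : List Int) ∧ b ∈ ([1, 2, 3, 4, 5, 6, 7] : List Int) then
      PySem.Dict.getD stepTable (PySem.Int.mod (b - a) 7) (none, none)
    else (none, none)
  | _, _ => (none, none)

-- ===== PRECONDITION & SPEC =====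
def Spec_cycle_of_transition (deg_from : Option Int) (deg_to : Option Int) (out : Option String × Option String) : Prop := out = cycle_of_transition_alt deg_from deg_to
instance (deg_from : Option Int) (deg_to : Option Int) (out : Option String × Option String) : Decidable (Spec_cycle_of_transition deg_from deg_to out) := by unfold Spec_cycle_of_transition; infer_instance

-- ===== CLAIM (what is proved, stated in full; the proofs are below) =====
def Claim_equal_cycle_of_transition : Prop := ∀ (deg_from : Option Int) (deg_to : Option Int), Dom_cycle_of_transition deg_from deg_to → Spec_cycle_of_transition deg_from deg_to (cycle_of_transition deg_from deg_to)

-- ===== LEMMAS AND PROOFS =====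

-- index? on the three 7-element orders is none exactly when the value is outside 1..7
theorem idxNone (x : Int) (hx : x ∉ ([1, 2, 3, 4, 5, 6, 7] : List Int)) :
    List.idxOf? x ([1, 2, 3, 4, 5, 6, 7] : List Int) = none ∧
    List.idxOf? x ([1, 3, 5, 7, 2, 4, 6] : List Int) = none ∧
    List.idxOf? x ([1, 4, 7, 3, 6, 2, 5] : List Int) = none := by
  refine ⟨?_, ?_, ?_⟩ <;>
    · rw [← PySem.List.index?_eq_idxOf?, PySem.List.index?_eq_none_iff]
      simp at hx ⊢; omega

-- ===== VERDICT (by name: the statement is the Claim_ definition above) =====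
theorem cycle_of_transition_spec : Claim_equal_cycle_of_transition := by
  intro deg_from deg_to _
  unfold Spec_cycle_of_transition
  match deg_from, deg_to with
  | none, none => rfl
  | none, some _ => rfl
  | some _, none => rfl
  | some a, some b =>
    by_cases ha : a ∈ ([1, 2, 3, 4, 5, 6, 7] : List Int)
    · by_cases hb : b ∈ ([1, 2, 3, 4, 5, 6, 7] : List Int)
      · simp only [List.mem_cons, List.not_mem_nil, or_false] at ha hb
        rcases ha with h|h|h|h|h|h|h <;> subst h <;>
          rcases hb with h|h|h|h|h|h|h <;> subst h <;> decide
      · obtain ⟨h1, h2, h3⟩ := idxNone b hb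
        have hab : a ≠ b := fun h => hb (h ▸ ha)
        simp [cycle_of_transition, cycle_of_transition_alt, cycleLoopA, hab, h1, h2, h3, hb]
    · obtain ⟨h1, h2, h3⟩ := idxNone a ha
      by_cases hab : a = b
      · subst hab; simp [cycle_of_transition, cycle_of_transition_alt, ha]
      · simp [cycle_of_transition, cycle_of_transition_alt, cycleLoopA, hab, h1, h2, h3, ha]
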